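-- pv_equiv track=rewrite | github.com/SpandanaK0/FirstYearProjects | FriendsCount/friendCount.py | find_max_second_friends
-- ===== SOURCE A (Python) =====
-- def find_max_second_friends(seconds_dict):
--     sec_max_friends= []
--     secMax_name = []
--
--     for i in seconds_dict.values():
--
--         maxSec_fri = len(i)
--         sec_max_friends.append(maxSec_fri)
--     friSec_max = max(sec_max_friends)
--
--     for m, line in enumerate(seconds_dict):
--         if sec_max_friends[m]== friSec_max:
--             secMax_name.append(line)
--     secName_sort = sorted(secMax_name)
--
--     return secName_sort,friSec_max
-- ===== SOURCE B (Python) =====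
-- def find_max_second_friends(seconds_dict):
--     groups = {}
--     for name, friends in seconds_dict.items():
--         groups.setdefault(len(friends), []).append(name)
--     max_len = max(groups)
--     return sorted(groups[max_len]), max_len
-- ===== Notes on version B (the rewrite author's own statement) =====
-- stated objective: alternative
-- what changed: Replaces A's parallel length-list + max + index-matched second scan with a single grouping pass building a dict len(value)->keys, then one max over the dict's keys and one lookup.
import Mathlib
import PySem

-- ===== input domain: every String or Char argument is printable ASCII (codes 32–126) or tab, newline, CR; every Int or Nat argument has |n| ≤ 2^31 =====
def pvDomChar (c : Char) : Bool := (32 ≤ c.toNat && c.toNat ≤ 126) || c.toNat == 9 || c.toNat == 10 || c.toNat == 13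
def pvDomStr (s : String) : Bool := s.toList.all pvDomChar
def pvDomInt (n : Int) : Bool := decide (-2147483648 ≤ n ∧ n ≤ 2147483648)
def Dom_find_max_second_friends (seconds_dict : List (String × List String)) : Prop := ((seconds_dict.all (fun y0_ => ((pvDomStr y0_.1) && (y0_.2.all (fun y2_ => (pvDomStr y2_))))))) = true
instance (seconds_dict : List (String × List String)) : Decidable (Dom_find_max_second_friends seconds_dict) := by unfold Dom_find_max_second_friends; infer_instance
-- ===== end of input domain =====

-- B replaces A's parallel length-list + second index-matched scan with a single grouping
-- pass (dict len(value) -> keys) plus one max over keys and one lookup (objective: alternative).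

-- ===== PORT A =====
def find_max_second_friends (seconds_dict : List (String × List String)) : List String × Int :=
  -- sec_max_friends: first loop, appending len(i) for each value
  let sec_max_friends : List Int :=
    seconds_dict.foldl (fun acc i => acc ++ [(i.2.length : Int)]) []
  -- friSec_max = max(sec_max_friends); Python raises ValueError on [] (excluded by Pre_)
  let friSec_max : Int := (PySem.List.max? sec_max_friends (fun x => x)).getD 0
  -- second loop: for m, line in enumerate(seconds_dict)  (iterating a dict yields its keys)
  let secMax_name : List String :=
    (PySem.List.enumerate (seconds_dict.map Prod.fst) 0).foldl
      (fun acc ml => if PySem.List.pyGetD sec_max_friends ml.1 0 == friSec_max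
                     then acc ++ [ml.2] else acc) []
  let secName_sort := PySem.List.sorted secMax_name (fun x => x) false
  (secName_sort, friSec_max)

-- ===== PORT B =====
def find_max_second_friends_alt (seconds_dict : List (String × List String)) : List String × Int :=
  -- groups.setdefault(len(friends), []).append(name)  ==  modify at key len with default []
  let groups : PySem.Dict Int (List String) :=
    seconds_dict.foldl
      (fun g p => g.modify ((p.2.length : Int)) [] (fun cur => cur ++ [p.1]))
      PySem.Dict.empty
  -- max(groups) iterates the dict's keys; ValueError on empty dict (excluded by Pre_)
  let max_len : Int := (PySem.List.max? groups.keys (fun x => x)).getD 0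
  (PySem.List.sorted (groups.getD max_len []) (fun x => x) false, max_len)

-- ===== PRECONDITION & SPEC =====
-- Pre_ excludes only the empty dict, on which both A and B raise ValueError (max of empty sequence).
def Pre_find_max_second_friends (seconds_dict : List (String × List String)) : Prop :=
  seconds_dict ≠ []
instance (seconds_dict : List (String × List String)) : Decidable (Pre_find_max_second_friends seconds_dict) := by unfold Pre_find_max_second_friends; infer_instance
def pvWitness_find_max_second_friends : (List (String × List String)) := [("a", ["b", "c"]), ("d", [])]

def Spec_find_max_second_friends (seconds_dict : List (String × List String)) (out : List String × Int) : Prop := out = find_max_second_friends_alt seconds_dict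
instance (seconds_dict : List (String × List String)) (out : List String × Int) : Decidable (Spec_find_max_second_friends seconds_dict out) := by unfold Spec_find_max_second_friends; infer_instance

-- ===== CLAIM (what is proved, stated in full; the proofs are below) =====
def Claim_equal_find_max_second_friends : Prop := ∀ (seconds_dict : List (String × List String)), Dom_find_max_second_friends seconds_dict → Pre_find_max_second_friends seconds_dict → Spec_find_max_second_friends seconds_dict (find_max_second_friends seconds_dict)

-- ===== LEMMAS AND PROOFS =====

-- A's first loop builds the list of value-lengths.
theorem pv_lens_eq (l : List (String × List String)) :
    l.foldl (fun acc i => acc ++ [(i.2.length : Int)]) [] = l.map (fun p => (p.2.length : Int)) := by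
  simpa using PySem.List.foldl_append_singleton_eq_map (l := l) (f := fun p => (p.2.length : Int))

-- A's enumerate loop, with the index looked up in the full length list, is a filter.
theorem pv_enum_loop (M : Int) :
    ∀ (l : List (String × List String)) (lens : List Int) (s : Nat) (acc : List String),
      (∀ k, (hk : k < l.length) → PySem.List.pyGetD lens ((s : Int) + k) 0 = (l[k].2.length : Int)) →
      (PySem.List.enumerate (l.map Prod.fst) (s : Int)).foldl
        (fun acc ml => if PySem.List.pyGetD lens ml.1 0 == M then acc ++ [ml.2] else acc) acc
      = acc ++ (l.filter (fun p => (p.2.length : Int) == M)).map Prod.fst := by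
  intro l
  induction l with
  | nil => intro lens s acc _; simp [PySem.List.enumerate_nil]
  | cons p t ih =>
    intro lens s acc h
    have h0 : PySem.List.pyGetD lens ((s : Int) + (0 : Nat)) 0 = (p.2.length : Int) := h 0 (by simp)
    simp only [List.map_cons, PySem.List.enumerate_cons, List.foldl_cons]
    have hs : (s : Int) + 1 = ((s + 1 : Nat) : Int) := by push_cast; ring
    have ih' := ih lens (s + 1) (if PySem.List.pyGetD lens s 0 == M then acc ++ [p.1] else acc)
      (by
        intro k hk
        have := h (k + 1) (by simpa using Nat.succ_lt_succ hk)
        simpa [Nat.add_comm, Int.add_comm, Int.add_assoc, Int.add_left_comm, push_cast] using this)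
    rw [hs, ih']
    have h0' : PySem.List.pyGetD lens (s : Int) 0 = (p.2.length : Int) := by simpa using h0
    by_cases hM : (p.2.length : Int) == M
    · simp [h0', hM]
    · simp [h0', hM]

-- B's grouping dict looked up at c is the filter of the (length, name) pairs.
theorem pv_groups_getD (l : List (String × List String)) (c : Int) :
    ((l.foldl (fun g p => g.modify ((p.2.length : Int)) [] (fun cur => cur ++ [p.1]))
        PySem.Dict.empty).getD c [])
    = (l.filter (fun p => (p.2.length : Int) == c)).map Prod.fst := by
  have := PySem.Dict.getD_foldl_modify_append
    (l := l.map (fun p => ((p.2.length : Int), p.1))) (d := PySem.Dict.empty) (c := c)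
  rw [List.foldl_map] at this
  simpa [List.filter_map, Function.comp_def] using this

-- B's dict keys are the deduplicated lengths.
theorem pv_groups_keys (l : List (String × List String)) :
    (l.foldl (fun g p => g.modify ((p.2.length : Int)) [] (fun cur => cur ++ [p.1]))
        PySem.Dict.empty).keys
    = PySem.Set.ofList (l.map (fun p => (p.2.length : Int))) := by
  have := PySem.Dict.keys_foldl_modify_key (l := l)
    (key := fun p : String × List String => (p.2.length : Int))
    (d0 := ([] : List String)) (f := fun _ p => (fun cur => cur ++ [p.1]))
    (d := PySem.Dict.empty)
  simpa [PySem.Dict.keys_empty, PySem.Set.update_empty] using this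

-- max over two lists with the same members agree.
theorem pv_max_congr (xs ys : List Int) (hmem : ∀ x : Int, x ∈ xs ↔ x ∈ ys)
    (hne : xs ≠ []) :
    PySem.List.max? xs (fun x => x) = PySem.List.max? ys (fun x => x) := by
  cases hx : PySem.List.max? xs (fun x => x) with
  | none => exact absurd ((PySem.List.max?_eq_none_iff _ _).1 hx) hne
  | some a =>
    cases hy : PySem.List.max? ys (fun x => x) with
    | none =>
      have : ys = [] := (PySem.List.max?_eq_none_iff _ _).1 hy
      have ha : a ∈ xs := PySem.List.max?_mem hx
      exact absurd ((hmem a).1 ha) (by simp [this])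
    | some b =>
      have ha : a ∈ xs := PySem.List.max?_mem hx
      have hb : b ∈ ys := PySem.List.max?_mem hy
      have h1 : a ≤ b := PySem.List.max?_isMax hy a ((hmem a).1 ha)
      have h2 : b ≤ a := PySem.List.max?_isMax hx b ((hmem b).2 hb)
      simp [le_antisymm h1 h2]

-- ===== VERDICT (by name: the statement is the Claim_ definition above) =====
theorem find_max_second_friends_spec : Claim_equal_find_max_second_friends := by
  intro l _ hne
  unfold Spec_find_max_second_friends
  simp only [find_max_second_friends, find_max_second_friends_alt]
  rw [pv_lens_eq l, pv_groups_keys l, pv_groups_getD l]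
  set lens := l.map (fun p => (p.2.length : Int)) with hlens
  have hlne : lens ≠ [] := by
    cases l with
    | nil => exact absurd rfl hne
    | cons p t => simp [hlens]
  have hmax : PySem.List.max? (PySem.Set.ofList lens) (fun x => x)
      = PySem.List.max? lens (fun x => x) := by
    refine pv_max_congr _ _ (fun x => PySem.Set.mem_ofList _ _) ?_
    cases h : PySem.Set.ofList lens with
    | nil =>
      exfalso
      cases hl : lens with
      | nil => exact hlne hl
      | cons a t =>
        have : a ∈ PySem.Set.ofList lens := (PySem.Set.mem_ofList _ _).2 (by simp [hl])
        simp [h] at this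
    | cons a t => simp
  rw [hmax]
  have hloop := pv_enum_loop ((PySem.List.max? lens (fun x => x)).getD 0) l lens 0 []
    (by
      intro k hk
      have hk' : k < lens.length := by simpa [hlens] using hk
      rw [show ((0 : Nat) : Int) + (k : Int) = ((k : Nat) : Int) by push_cast; ring,
        PySem.List.pyGetD_natCast]
      simp [hlens, List.getD_eq_getElem?_getD, List.getElem?_eq_getElem hk])
  simp only [Nat.cast_zero] at hloop
  rw [hloop]
  simp
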